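-- pv_equiv track=rewrite | github.com/hackedteam/vector-offline2 | offline-install/offline_gui.py | scramble_name
-- ===== SOURCE A (Python) =====
-- def scramble_name(string, scramble, crypt):
-- 	ALPHABET_LEN = 64
--
-- 	alphabet = ['_', 'B', 'q', 'w', 'H', 'a', 'F', '8', 'T', 'k', 'K', 'D', 'M',
-- 		    'f', 'O', 'z', 'Q', 'A', 'S', 'x', '4', 'V', 'u', 'X', 'd', 'Z',
-- 		    'i', 'b', 'U', 'I', 'e', 'y', 'l', 'J', 'W', 'h', 'j', '0', 'm',
-- 		    '5', 'o', '2', 'E', 'r', 'L', 't', '6', 'v', 'G', 'R', 'N', '9',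
-- 		    's', 'Y', '1', 'n', '3', 'P', 'p', 'c', '7', 'g', '-', 'C']
--
-- 	#
-- 	# Don't using the original names when byte is 0 or not
-- 	##
-- 	scramble %= ALPHABET_LEN
--
-- 	if scramble == 0:
-- 		scramble = 1
--
-- 	ret_string = ""
--
-- 	for i in range(0, len(string)):
-- 		found = False
--
-- 		for j in range(0, ALPHABET_LEN):
-- 			if string[i] == alphabet[j]:
-- 				found = True
--
-- 				#
-- 				# If crypt is true using crypt, else using decrypt
-- 				##
-- 				if crypt == True:
-- 					ret_string += alphabet[(j + scramble) % ALPHABET_LEN]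
-- 				else:
-- 					ret_string += alphabet[(j + ALPHABET_LEN - scramble) % ALPHABET_LEN]
-- 				break
--
-- 		if found == False:
-- 			ret_string += string[i]
--
-- 	return ret_string
-- ===== SOURCE B (Python) =====
-- def scramble_name(string, scramble, crypt):
--     # Different algorithm: instead of addressing the shifted alphabet by modular
--     # index arithmetic, build the successor (or predecessor) permutation of the
--     # alphabet's cyclic order once, and apply it `scramble` times to each char.
--     alphabet = ['_', 'B', 'q', 'w', 'H', 'a', 'F', '8', 'T', 'k', 'K', 'D', 'M',
--                 'f', 'O', 'z', 'Q', 'A', 'S', 'x', '4', 'V', 'u', 'X', 'd', 'Z',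
--                 'i', 'b', 'U', 'I', 'e', 'y', 'l', 'J', 'W', 'h', 'j', '0', 'm',
--                 '5', 'o', '2', 'E', 'r', 'L', 't', '6', 'v', 'G', 'R', 'N', '9',
--                 's', 'Y', '1', 'n', '3', 'P', 'p', 'c', '7', 'g', '-', 'C']
--     s = scramble % 64
--     if s == 0:
--         s = 1
--     rot = alphabet[1:] + alphabet[:1]
--     step = dict(zip(alphabet, rot)) if crypt else dict(zip(rot, alphabet))
--     out = []
--     for c in string:
--         if c in step:
--             for _ in range(s):
--                 c = step[c]
--         out.append(c)
--     return "".join(out)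
-- ===== Notes on version B (the rewrite author's own statement) =====
-- stated objective: alternative
-- what changed: B drops A's per-character linear scan of the alphabet and its modular index arithmetic entirely: it builds the cyclic successor (crypt) or predecessor (decrypt) permutation of the alphabet once as a dict and applies that one-step permutation scramble times to each character, leaving non-alphabet characters untouched.
import Mathlib
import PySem

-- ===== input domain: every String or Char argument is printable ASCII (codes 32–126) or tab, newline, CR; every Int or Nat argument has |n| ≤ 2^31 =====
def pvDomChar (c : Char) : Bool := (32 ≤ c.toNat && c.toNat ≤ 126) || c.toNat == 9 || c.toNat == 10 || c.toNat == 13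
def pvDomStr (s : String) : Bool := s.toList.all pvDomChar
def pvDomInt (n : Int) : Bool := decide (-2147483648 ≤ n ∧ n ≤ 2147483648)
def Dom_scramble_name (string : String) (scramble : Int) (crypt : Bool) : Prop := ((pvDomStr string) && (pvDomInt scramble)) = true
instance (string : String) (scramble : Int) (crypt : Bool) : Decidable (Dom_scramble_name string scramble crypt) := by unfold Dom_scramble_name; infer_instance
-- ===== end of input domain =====

-- B replaces A's per-character modular-index arithmetic over the alphabet by a cyclic
-- successor/predecessor permutation applied `scramble` times to each character
-- (objective: alternative — a different algorithm of similar cost, not claimed faster).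

-- ===== PORT A =====
def pvAlphaA : List Char :=
  ['_', 'B', 'q', 'w', 'H', 'a', 'F', '8', 'T', 'k', 'K', 'D', 'M',
   'f', 'O', 'z', 'Q', 'A', 'S', 'x', '4', 'V', 'u', 'X', 'd', 'Z',
   'i', 'b', 'U', 'I', 'e', 'y', 'l', 'J', 'W', 'h', 'j', '0', 'm',
   '5', 'o', '2', 'E', 'r', 'L', 't', '6', 'v', 'G', 'R', 'N', '9',
   's', 'Y', '1', 'n', '3', 'P', 'p', 'c', '7', 'g', '-', 'C']

-- inner loop 'for j in range(0, 64): if string[i] == alphabet[j]: … break'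
-- (alphabet[j] via pyGetD: j is always in range for the 64-element literal)
def pvInnerA (c : Char) (s : Int) (crypt : Bool) : List Int → Option Char
  | [] => none
  | j :: js =>
    if c == PySem.List.pyGetD pvAlphaA j ' ' then
      some (if crypt then PySem.List.pyGetD pvAlphaA (PySem.Int.mod (j + s) 64) ' '
            else PySem.List.pyGetD pvAlphaA (PySem.Int.mod (j + 64 - s) 64) ' ')
    else pvInnerA c s crypt js

def scramble_name (string : String) (scramble : Int) (crypt : Bool) : String :=
  let s0 := PySem.Int.mod scramble 64
  let s := if s0 = 0 then 1 else s0
  let cs := string.toList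
  String.mk ((PySem.List.pyRange 0 (cs.length : Int) 1).foldl
    (fun acc i =>
      let c := PySem.List.pyGetD cs i ' '
      match pvInnerA c s crypt (PySem.List.pyRange 0 64 1) with
      | some ch => acc ++ [ch]
      | none => acc ++ [c]) [])

-- ===== PORT B =====
def pvAlphaB : List Char :=
  ['_', 'B', 'q', 'w', 'H', 'a', 'F', '8', 'T', 'k', 'K', 'D', 'M',
   'f', 'O', 'z', 'Q', 'A', 'S', 'x', '4', 'V', 'u', 'X', 'd', 'Z',
   'i', 'b', 'U', 'I', 'e', 'y', 'l', 'J', 'W', 'h', 'j', '0', 'm',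
   '5', 'o', '2', 'E', 'r', 'L', 't', '6', 'v', 'G', 'R', 'N', '9',
   's', 'Y', '1', 'n', '3', 'P', 'p', 'c', '7', 'g', '-', 'C']

-- rot = alphabet[1:] + alphabet[:1]  (slices with literal in-range bounds: drop 1 / take 1, exact)
def pvRotB : List Char := pvAlphaB.drop 1 ++ pvAlphaB.take 1

-- step = dict(zip(alphabet, rot)) / dict(zip(rot, alphabet)); the keys are 64 distinct
-- chars, so dict lookup = first match in the zipped association list (exact here)
def pvTabB (crypt : Bool) : List (Char × Char) :=
  if crypt then pvAlphaB.zip pvRotB else pvRotB.zip pvAlphaB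

-- step[c]: key always present when called (values of step are again keys), so getD c is exact
def pvLook (tab : List (Char × Char)) (c : Char) : Char :=
  ((tab.find? (fun q => q.1 == c)).map Prod.snd).getD c

-- 'for _ in range(s): c = step[c]'
def pvIterB (tab : List (Char × Char)) : Nat → Char → Char
  | 0, c => c
  | n + 1, c => pvIterB tab n (pvLook tab c)

def scramble_name_alt (string : String) (scramble : Int) (crypt : Bool) : String :=
  let s0 := PySem.Int.mod scramble 64
  let s := if s0 = 0 then 1 else s0
  let tab := pvTabB crypt
  String.mk (string.toList.map (fun c =>
    if ((tab.find? (fun q => q.1 == c)).isSome) then pvIterB tab s.toNat c else c))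

-- ===== PRECONDITION & SPEC =====
def Spec_scramble_name (string : String) (scramble : Int) (crypt : Bool) (out : String) : Prop := out = scramble_name_alt string scramble crypt
instance (string : String) (scramble : Int) (crypt : Bool) (out : String) : Decidable (Spec_scramble_name string scramble crypt out) := by unfold Spec_scramble_name; infer_instance

-- ===== CLAIM (what is proved, stated in full; the proofs are below) =====
def Claim_equal_scramble_name : Prop := ∀ (string : String) (scramble : Int) (crypt : Bool), Dom_scramble_name string scramble crypt → Spec_scramble_name string scramble crypt (scramble_name string scramble crypt)

-- ===== LEMMAS AND PROOFS =====

-- A's per-character step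
def pvStep (c : Char) (s : Int) (crypt : Bool) : Char :=
  match pvInnerA c s crypt (PySem.List.pyRange 0 64 1) with
  | some ch => ch
  | none => c

-- A's shift of a found index j
def pvValA (s : Int) (crypt : Bool) (j : Int) : Char :=
  if crypt then PySem.List.pyGetD pvAlphaA (PySem.Int.mod (j + s) 64) ' '
  else PySem.List.pyGetD pvAlphaA (PySem.Int.mod (j + 64 - s) 64) ' '

-- A's inner scan is a find? over the index list
theorem pv_inner_eq_find (c : Char) (s : Int) (crypt : Bool) (js : List Int) :
    pvInnerA c s crypt js
      = (js.find? (fun j => c == PySem.List.pyGetD pvAlphaA j ' ')).map (pvValA s crypt) := by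
  induction js with
  | nil => simp [pvInnerA]
  | cons j js ih =>
    by_cases h : (c == PySem.List.pyGetD pvAlphaA j ' ') = true
    · simp [pvInnerA, List.find?, h, pvValA]
    · simp only [Bool.not_eq_true] at h
      simp [pvInnerA, List.find?, h, ih]

-- first-match over range-of-indices = idxOf
theorem pv_find_range (l : List Char) (c : Char) :
    (List.range l.length).find? (fun k => c == l.getD k ' ')
      = if c ∈ l then some (l.idxOf c) else none := by
  induction l with
  | nil => simp
  | cons a tl ih =>
    rw [List.length_cons, List.range_succ_eq_map]
    by_cases h : c = a
    · subst h; simp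
    · have h0 : ((fun k => c == (a :: tl).getD k ' ') 0) = false := by
        simp [List.getD, h]
      rw [List.find?_cons_of_neg (by simpa using h0), List.find?_map]
      have hp : ((fun k => c == (a :: tl).getD k ' ') ∘ (· + 1))
          = (fun k => c == tl.getD k ' ') := by
        funext k; simp [List.getD]
      rw [hp, ih]
      by_cases hm : c ∈ tl
      · have hac : (a == c) = false := by
          simp only [beq_eq_false_iff_ne]; exact fun he => h he.symm
        simp [hm, h, List.idxOf_cons, hac]
      · have : c ∉ a :: tl := by simp [h, hm]
        simp [hm, this]

theorem pv_step_enc : ∀ k ∈ List.range 64,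
    pvLook (pvTabB true) (pvAlphaB.getD k ' ') = pvAlphaB.getD ((k + 1) % 64) ' ' := by decide

theorem pv_step_dec : ∀ k ∈ List.range 64,
    pvLook (pvTabB false) (pvAlphaB.getD k ' ') = pvAlphaB.getD ((k + 63) % 64) ' ' := by decide

-- iterating the one-step permutation d places forward, n times
theorem pv_iter (tab : List (Char × Char)) (d : Nat)
    (hstep : ∀ k ∈ List.range 64, pvLook tab (pvAlphaB.getD k ' ') = pvAlphaB.getD ((k + d) % 64) ' ') :
    ∀ (n k : Nat), k < 64 →
      pvIterB tab n (pvAlphaB.getD k ' ') = pvAlphaB.getD ((k + d * n) % 64) ' ' := by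
  intro n
  induction n with
  | zero => intro k hk; simp [pvIterB, Nat.mod_eq_of_lt hk]
  | succ n ih =>
    intro k hk
    rw [pvIterB, hstep k (List.mem_range.mpr hk),
        ih ((k + d) % 64) (Nat.mod_lt _ (by norm_num))]
    congr 1
    rw [Nat.mod_add_mod]
    ring_nf

theorem pv_mem_rot_of_mem (c : Char) (h : c ∈ pvAlphaB) : c ∈ pvRotB := by
  have h' : c ∈ pvAlphaB.take 1 ++ pvAlphaB.drop 1 := by rwa [List.take_append_drop]
  rcases List.mem_append.mp h' with h1 | h2
  · exact List.mem_append.mpr (Or.inr h1)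
  · exact List.mem_append.mpr (Or.inl h2)

theorem pv_mem_of_mem_rot (c : Char) (h : c ∈ pvRotB) : c ∈ pvAlphaB := by
  rcases List.mem_append.mp h with h1 | h2
  · exact List.mem_of_mem_drop h1
  · exact List.mem_of_mem_take h2

theorem pv_keys_tab (crypt : Bool) (q : Char × Char) (h : q ∈ pvTabB crypt) : q.1 ∈ pvAlphaB := by
  cases crypt
  · exact pv_mem_of_mem_rot _ (List.of_mem_zip h).1
  · exact (List.of_mem_zip h).1

theorem pv_zip_find_isSome (l l' : List Char) (c : Char)
    (hlen : l.length = l'.length) (h : c ∈ l) :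
    ((l.zip l').find? (fun q => q.1 == c)).isSome := by
  induction l generalizing l' with
  | nil => simp at h
  | cons a tl ih =>
    cases l' with
    | nil => simp at hlen
    | cons b tl' =>
      by_cases hca : a = c
      · simp [List.zip_cons_cons, hca]
      · have hne : ¬((((a, b) : Char × Char).1 == c) = true) := by simp [hca]
        rw [List.zip_cons_cons,
            List.find?_cons_of_neg (p := fun q => q.1 == c) (a := (a, b)) hne]
        refine ih tl' (by simpa using hlen) ?_
        rcases List.mem_cons.mp h with h1 | h2
        · exact absurd h1.symm hca
        · exact h2

theorem pv_find_tab_isSome (crypt : Bool) (c : Char) (h : c ∈ pvAlphaB) :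
    ((pvTabB crypt).find? (fun q => q.1 == c)).isSome := by
  cases crypt
  · exact pv_zip_find_isSome pvRotB pvAlphaB c (by decide) (pv_mem_rot_of_mem c h)
  · exact pv_zip_find_isSome pvAlphaB pvRotB c (by decide) h

theorem pv_find_tab_none (crypt : Bool) (c : Char) (h : c ∉ pvAlphaB) :
    ((pvTabB crypt).find? (fun q => q.1 == c)) = none := by
  rw [List.find?_eq_none]
  intro q hq
  simp only [beq_iff_eq]
  intro he
  exact h (he ▸ pv_keys_tab crypt q hq)

theorem pv_mod64_natCast (m : Nat) : PySem.Int.mod (m : Int) 64 = ((m % 64 : Nat) : Int) := by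
  have h : ((64 : Int)) = ((64 : Nat) : Int) := by norm_num
  rw [h, PySem.Int.mod_natCast]

-- per-character agreement of A's scan-and-shift with B's iterated permutation
theorem pv_char_eq (c : Char) (s : Int) (crypt : Bool) (hs1 : 1 ≤ s) (hs2 : s ≤ 63) :
    pvStep c s crypt
      = (if ((pvTabB crypt).find? (fun q => q.1 == c)).isSome
         then pvIterB (pvTabB crypt) s.toNat c else c) := by
  have hlen : pvAlphaA.length = 64 := by decide
  have hfind : (PySem.List.pyRange 0 64 1).find? (fun j => c == PySem.List.pyGetD pvAlphaA j ' ')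
      = ((List.range pvAlphaA.length).find? (fun k => c == pvAlphaA.getD k ' ')).map
          (fun k : Nat => (k : Int)) := by
    have h64 : ((64 : Int) - 0).toNat = 64 := by decide
    rw [PySem.List.pyRange_one, h64, List.find?_map, hlen]
    simp only [Function.comp_def, zero_add, PySem.List.pyGetD_natCast]
  rw [pvStep, pv_inner_eq_find, hfind, pv_find_range]
  by_cases h : c ∈ pvAlphaA
  · rw [if_pos h, if_pos (pv_find_tab_isSome crypt c h)]
    set k := pvAlphaA.idxOf c with hkdef
    have hk : k < 64 := hlen ▸ List.idxOf_lt_length_of_mem h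
    have hc : pvAlphaA.getD k ' ' = c := by
      rw [List.getD_eq_getElem _ _ (hlen ▸ hk)]
      exact List.getElem_idxOf (hlen ▸ hk)
    have hAB : pvAlphaB = pvAlphaA := rfl
    have hs' : s.toNat ≤ 63 ∧ 1 ≤ s.toNat := by omega
    cases crypt
    · -- decrypt: A uses (k + 64 - s) % 64; B iterates predecessor s times
      have hiter := pv_iter (pvTabB false) 63 pv_step_dec s.toNat k hk
      rw [hAB] at hiter
      rw [← hc, hiter]
      simp only [Option.map_some, pvValA, Bool.false_eq_true, if_false]
      have h1 : ((k : Int) + 64 - s) = ((k + 64 - s.toNat : Nat) : Int) := by omega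
      rw [h1, pv_mod64_natCast, PySem.List.pyGetD_natCast]
      congr 1
      omega
    · have hiter := pv_iter (pvTabB true) 1 pv_step_enc s.toNat k hk
      rw [hAB] at hiter
      rw [← hc, hiter]
      simp only [Option.map_some, pvValA, if_true]
      have h1 : ((k : Int) + s) = ((k + s.toNat : Nat) : Int) := by omega
      rw [h1, pv_mod64_natCast, PySem.List.pyGetD_natCast]
      congr 1
      omega
  · rw [if_neg h, pv_find_tab_none crypt c h]
    simp

theorem pv_s_bounds (scramble : Int) :
    1 ≤ (if PySem.Int.mod scramble 64 = 0 then 1 else PySem.Int.mod scramble 64)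
    ∧ (if PySem.Int.mod scramble 64 = 0 then 1 else PySem.Int.mod scramble 64) ≤ 63 := by
  have h : PySem.Int.mod scramble 64 = scramble % 64 :=
    PySem.Int.mod_eq_emod_of_pos (by norm_num)
  have h1 : 0 ≤ scramble % 64 := Int.emod_nonneg _ (by norm_num)
  have h2 : scramble % 64 < 64 := Int.emod_lt_of_pos _ (by norm_num)
  rw [h]
  split_ifs with h0 <;> omega

theorem scramble_name_spec : Claim_equal_scramble_name := by
  intro string scramble crypt _
  unfold Spec_scramble_name scramble_name scramble_name_alt
  simp only []
  set s0 := PySem.Int.mod scramble 64 with hs0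
  set s := if s0 = 0 then 1 else s0 with hs
  obtain ⟨hb1, hb2⟩ := pv_s_bounds scramble
  rw [← hs0, ← hs] at hb1 hb2
  set cs := string.toList with hcs
  have hbody :
      (fun (acc : List Char) (i : Int) =>
        let c := PySem.List.pyGetD cs i ' '
        match pvInnerA c s crypt (PySem.List.pyRange 0 64 1) with
        | some ch => acc ++ [ch]
        | none => acc ++ [c])
      = (fun (acc : List Char) (i : Int) =>
          acc ++ [pvStep (PySem.List.pyGetD cs i ' ') s crypt]) := by
    funext acc i
    unfold pvStep
    cases h : pvInnerA (PySem.List.pyGetD cs i ' ') s crypt (PySem.List.pyRange 0 64 1) <;> simp [h]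
  have hfold := PySem.List.foldl_pyRange_zero_pyGetD' cs ' '
      (fun (acc : List Char) (x : Char) => acc ++ [pvStep x s crypt]) ([] : List Char)
  rw [hbody, hfold, PySem.List.foldl_append_singleton_eq_map]
  simp only [List.nil_append]
  congr 1
  apply List.map_congr_left
  intro c _
  exact pv_char_eq c s crypt hb1 hb2
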